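-- pv_equiv track=rewrite | github.com/mopuriapurva/MLA0102-Artificial-Intelligence-5138 | vacuum_cleaner.py | bfs
-- ===== SOURCE A (Python) =====
-- from collections import deque
--
-- directions = [(-1, 0), (1, 0), (0, -1), (0, 1)]
--
-- grid = [
--     [0, 1, 0, 0],
--     [0, 0, 1, 0],
--     [1, 0, 0, 0],
--     [0, 0, 0, 1]
-- ]
--
-- ROWS = len(grid)
--
-- COLS = len(grid[0])
--
-- def in_bounds(x, y):
--     return 0 <= x < ROWS and 0 <= y < COLS
--
-- def bfs(start):
--     visited = set()
--     queue = deque()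
--     queue.append((start, [start]))  # position and path
--     visited.add(start)
--
--     while queue:
--         (x, y), path = queue.popleft()
--         if grid[x][y] == 1:  # Found dirty cell
--             return path
--         for dx, dy in directions:
--             nx, ny = x + dx, y + dy
--             if in_bounds(nx, ny) and (nx, ny) not in visited:
--                 visited.add((nx, ny))
--                 queue.append(((nx, ny), path + [(nx, ny)]))
--     return None
-- ===== SOURCE B (Python) =====
-- from collections import deque
--
-- directions = [(-1, 0), (1, 0), (0, -1), (0, 1)]
--
-- grid = [
--     [0, 1, 0, 0],
--     [0, 0, 1, 0],
--     [1, 0, 0, 0],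
--     [0, 0, 0, 1]
-- ]
--
-- ROWS = len(grid)
--
-- COLS = len(grid[0])
--
-- def in_bounds(x, y):
--     return 0 <= x < ROWS and 0 <= y < COLS
--
-- def bfs(start):
--     came_from = {start: None}   # discovered cells -> predecessor; doubles as the visited set
--     queue = deque([start])
--     while queue:
--         x, y = queue.popleft()
--         if grid[x][y] == 1:  # found a dirty cell: walk parent pointers back to the start
--             path = []
--             cur = (x, y)
--             while cur is not None:
--                 path.append(cur)
--                 cur = came_from[cur]
--             path.reverse()
--             return path
--         for dx, dy in directions:
--             n = (x + dx, y + dy)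
--             if in_bounds(*n) and n not in came_from:
--                 came_from[n] = (x, y)
--                 queue.append(n)
--     return None
-- ===== Notes on version B (the rewrite author's own statement) =====
-- stated objective: simpler
-- what changed: BFS carries only positions in the queue and a came_from parent-pointer dict (doubling as the visited set), reconstructing the path once at the goal, instead of copying the whole path into every queue entry.
import Mathlib
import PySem

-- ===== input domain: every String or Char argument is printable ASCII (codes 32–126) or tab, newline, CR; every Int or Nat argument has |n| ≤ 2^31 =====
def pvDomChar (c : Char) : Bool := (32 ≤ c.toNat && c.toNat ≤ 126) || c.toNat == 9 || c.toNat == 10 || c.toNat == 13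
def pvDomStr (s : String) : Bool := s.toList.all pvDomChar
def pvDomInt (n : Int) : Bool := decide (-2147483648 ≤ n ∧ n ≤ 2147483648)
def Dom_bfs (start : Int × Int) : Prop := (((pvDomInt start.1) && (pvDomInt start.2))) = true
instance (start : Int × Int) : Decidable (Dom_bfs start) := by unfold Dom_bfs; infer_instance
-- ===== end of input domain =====

-- B replaces A's path-in-the-queue BFS by a parent-pointer (came_from) BFS with an explicit
-- path-reconstruction pass; objective: simpler (no path list copied per enqueued cell).

-- ===== PORT A =====
def pvGrid : List (List Int) := [[0, 1, 0, 0], [0, 0, 1, 0], [1, 0, 0, 0], [0, 0, 0, 1]]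

def pvDirections : List (Int × Int) := [(-1, 0), (1, 0), (0, -1), (0, 1)]

-- grid[x][y]; exact (Python negative-index rule) wherever Python does not raise, i.e. inside Pre_bfs
def pvCell (x y : Int) : Int :=
  (PySem.List.pyGet? ((PySem.List.pyGet? pvGrid x).getD []) y).getD 0

def inBounds (x y : Int) : Bool :=
  decide (0 ≤ x) && decide (x < 4) && decide (0 ≤ y) && decide (y < 4)

-- A's while loop. Fuel is a totality guard only: every dequeued cell was added to `visited`
-- at enqueue time and never removed, so there are at most 17 iterations; 100 is never exhausted.
def bfsLoopA : Nat → List ((Int × Int) × List (Int × Int)) → PySem.Set (Int × Int) →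
    Option (List (Int × Int))
  | 0, _, _ => none
  | _ + 1, [], _ => none
  | fuel + 1, ((x, y), path) :: rest, visited =>
    if pvCell x y = 1 then some path
    else
      let st := pvDirections.foldl
        (fun (acc : List ((Int × Int) × List (Int × Int)) × PySem.Set (Int × Int)) d =>
          let nx := x + d.1
          let ny := y + d.2
          if inBounds nx ny && !(PySem.Set.contains acc.2 (nx, ny)) then
            (acc.1 ++ [((nx, ny), path ++ [(nx, ny)])], PySem.Set.add acc.2 (nx, ny))
          else acc)
        (rest, visited)
      bfsLoopA fuel st.1 st.2

def bfs (start : Int × Int) : Option (List (Int × Int)) :=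
  bfsLoopA 100 [(start, [start])] (PySem.Set.add PySem.Set.empty start)

-- ===== PORT B =====
-- follow came_from pointers from the found cell; fuel guard only (chain length ≤ 17)
def pvReconstruct : Nat → PySem.Dict (Int × Int) (Option (Int × Int)) → Option (Int × Int) →
    List (Int × Int) → List (Int × Int)
  | 0, _, _, path => path
  | _ + 1, _, none, path => path
  | fuel + 1, came, some c, path => pvReconstruct fuel came (PySem.Dict.getD came c none) (path ++ [c])

-- B's while loop: queue of positions only, came_from doubles as the visited set
def bfsLoopB : Nat → List (Int × Int) → PySem.Dict (Int × Int) (Option (Int × Int)) →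
    Option (List (Int × Int))
  | 0, _, _ => none
  | _ + 1, [], _ => none
  | fuel + 1, (x, y) :: rest, came =>
    if pvCell x y = 1 then some (pvReconstruct 100 came (some (x, y)) []).reverse
    else
      let st := pvDirections.foldl
        (fun (acc : List (Int × Int) × PySem.Dict (Int × Int) (Option (Int × Int))) d =>
          let n := (x + d.1, y + d.2)
          if inBounds n.1 n.2 && !(PySem.Dict.contains acc.2 n) then
            (acc.1 ++ [n], PySem.Dict.insert acc.2 n (some (x, y)))
          else acc)
        (rest, came)
      bfsLoopB fuel st.1 st.2

def bfs_alt (start : Int × Int) : Option (List (Int × Int)) :=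
  bfsLoopB 100 [start] (PySem.Dict.insert PySem.Dict.empty start none)

-- ===== PRECONDITION & SPEC =====
-- Pre_ excludes exactly the starts on which A raises IndexError at grid[x][y]
-- (a row/column index outside [-4, 3]); nothing A returns on is excluded.
def Pre_bfs (start : Int × Int) : Prop :=
  -4 ≤ start.1 ∧ start.1 ≤ 3 ∧ -4 ≤ start.2 ∧ start.2 ≤ 3
instance (start : Int × Int) : Decidable (Pre_bfs start) := by unfold Pre_bfs; infer_instance

def pvWitness_bfs : (Int × Int) := (0, 0)

def Spec_bfs (start : Int × Int) (out : Option (List (Int × Int))) : Prop := out = bfs_alt start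
instance (start : Int × Int) (out : Option (List (Int × Int))) : Decidable (Spec_bfs start out) := by
  unfold Spec_bfs; infer_instance

-- ===== CLAIM (what is proved, stated in full; the proofs are below) =====
def Claim_equal_bfs : Prop := ∀ (start : Int × Int), Dom_bfs start → Pre_bfs start → Spec_bfs start (bfs start)

-- ===== LEMMAS AND PROOFS =====

-- ===== VERDICT (by name: the statement is the Claim_ definition above) =====
theorem bfs_spec : Claim_equal_bfs := by
  unfold Claim_equal_bfs
  rintro ⟨x, y⟩ _ ⟨h1, h2, h3, h4⟩
  unfold Spec_bfs
  interval_cases x <;> interval_cases y <;> decide
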